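-- pv_equiv track=rewrite | github.com/andrevar/my-codewars-katas-solutions | 6 kyu/Multi-tap_Keypad_Text_Entry_on_an_Old_Mobile_Phone.py | presses
-- ===== SOURCE A (Python) =====
-- def presses(phrase):
--     pad = ['1','ABC2','DEF3','GHI4','JKL5','MNO6',
--           'PQRS7','TUV8','WXYZ9','*',' 0','#']
--     sum = 0
--     for i in phrase.upper():
--         for j in pad:
--              if i in j:
--                  sum += j.index(i) + 1
--                  break
--     return sum
-- ===== SOURCE B (Python) =====
-- def presses(phrase):
--     pad = ['1','ABC2','DEF3','GHI4','JKL5','MNO6',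
--            'PQRS7','TUV8','WXYZ9','*',' 0','#']
--     cnt = {}
--     for ch in phrase.upper():
--         cnt[ch] = cnt.get(ch, 0) + 1
--     total = 0
--     for keys in pad:
--         for idx, ch in enumerate(keys):
--             total += (idx + 1) * cnt.get(ch, 0)
--     return total
-- ===== Notes on version B (the rewrite author's own statement) =====
-- stated objective: faster
-- what changed: B inverts the loops: one pass over phrase.upper() builds a character-frequency histogram, then it iterates the pad once summing (position+1) * frequency per pad character, instead of A's per-character inner pad scan with break and str.index.
import Mathlib
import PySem

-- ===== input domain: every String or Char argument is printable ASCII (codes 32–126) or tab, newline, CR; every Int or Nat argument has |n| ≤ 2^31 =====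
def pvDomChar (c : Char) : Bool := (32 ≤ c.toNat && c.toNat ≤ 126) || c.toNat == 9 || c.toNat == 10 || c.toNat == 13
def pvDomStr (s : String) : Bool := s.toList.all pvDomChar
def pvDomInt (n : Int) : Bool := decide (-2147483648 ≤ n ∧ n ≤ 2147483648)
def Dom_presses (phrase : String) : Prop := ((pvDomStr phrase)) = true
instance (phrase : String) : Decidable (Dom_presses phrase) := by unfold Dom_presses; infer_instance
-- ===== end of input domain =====

-- B inverts A's loops: it histograms phrase.upper() once, then sums (position+1)*frequency over the pad, replacing A's per-character pad scan (alternative decomposition, same result).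

-- ===== PORT A =====
def pvPadA : List String := ["1","ABC2","DEF3","GHI4","JKL5","MNO6",
  "PQRS7","TUV8","WXYZ9","*"," 0","#"]

-- inner 'for j in pad: if i in j: sum += j.index(i)+1; break' loop; i is a single
-- character, so Python's 'i in j' is char membership and j.index(i) is List.index? (found here).
def pvInnerA (c : Char) : List String → Int
  | [] => 0
  | j :: rest =>
      if c ∈ j.toList then (((PySem.List.index? j.toList c).getD 0 : Nat) : Int) + 1
      else pvInnerA c rest

def presses (phrase : String) : Int :=
  (PySem.Str.upper phrase).toList.foldl (fun s i => s + pvInnerA i pvPadA) 0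

-- ===== PORT B =====
def pvPadB : List String := ["1","ABC2","DEF3","GHI4","JKL5","MNO6",
  "PQRS7","TUV8","WXYZ9","*"," 0","#"]

def presses_alt (phrase : String) : Int :=
  let cnt := (PySem.Str.upper phrase).toList.foldl
      (fun d ch => d.insert ch (d.getD ch 0 + 1)) PySem.Dict.empty
  pvPadB.foldl (fun total keys =>
    (PySem.List.enumerate keys.toList 0).foldl
      (fun total p => total + (p.1 + 1) * cnt.getD p.2 0) total) 0

-- ===== PRECONDITION & SPEC =====
def Spec_presses (phrase : String) (out : Int) : Prop := out = presses_alt phrase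
instance (phrase : String) (out : Int) : Decidable (Spec_presses phrase out) := by unfold Spec_presses; infer_instance

-- ===== CLAIM (what is proved, stated in full; the proofs are below) =====
def Claim_equal_presses : Prop := ∀ (phrase : String), Dom_presses phrase → Spec_presses phrase (presses phrase)

-- ===== LEMMAS AND PROOFS =====

-- the flattened pad as (character, press-count) pairs
def pvPairs : List (Char × Int) :=
  [('1',1),
   ('A',1),('B',2),('C',3),('2',4),
   ('D',1),('E',2),('F',3),('3',4),
   ('G',1),('H',2),('I',3),('4',4),
   ('J',1),('K',2),('L',3),('5',4),
   ('M',1),('N',2),('O',3),('6',4),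
   ('P',1),('Q',2),('R',3),('S',4),('7',5),
   ('T',1),('U',2),('V',3),('8',4),
   ('W',1),('X',2),('Y',3),('Z',4),('9',5),
   ('*',1),
   (' ',1),('0',2),
   ('#',1)]

-- all characters occurring anywhere in the pad
def pvPadChars : List Char := pvPairs.map (·.1)

-- weight of x in the flattened pad
def pvW (ps : List (Char × Int)) (x : Char) : Int :=
  (ps.map (fun p => p.2 * (if p.1 = x then 1 else 0))).sum

theorem pvInnerA_zero_of_not_mem (c : Char) (pads : List String)
    (h : ∀ j ∈ pads, c ∉ j.toList) : pvInnerA c pads = 0 := by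
  induction pads with
  | nil => rfl
  | cons j rest ih =>
      simp only [pvInnerA, if_neg (h j (by simp))]
      exact ih (fun j' hj' => h j' (by simp [hj']))

-- the single-character step agrees: A's pad scan = the flattened-pad weight
set_option maxRecDepth 10000 in
theorem pvStep_eq (c : Char) : pvInnerA c pvPadA = pvW pvPairs c := by
  by_cases h : c ∈ pvPadChars
  · fin_cases h <;> decide
  · have hpc : ∀ p ∈ pvPairs, p.1 ≠ c := by
      intro p hp hpc
      exact h (by unfold pvPadChars; exact List.mem_map.mpr ⟨p, hp, hpc⟩)
    have hA : pvInnerA c pvPadA = 0 := by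
      apply pvInnerA_zero_of_not_mem
      intro j hj hc
      have hsub : (pvPadA.all (fun j => j.toList.all (fun x => decide (x ∈ pvPadChars)))) = true := by
        decide
      simp only [List.all_eq_true, decide_eq_true_eq] at hsub
      exact h (hsub j hj c hc)
    have hB : pvW pvPairs c = 0 := by
      unfold pvW
      rw [List.sum_eq_zero]
      intro z hz
      simp only [List.mem_map] at hz
      obtain ⟨p, hp, rfl⟩ := hz
      simp [hpc p hp]
    rw [hA, hB]

-- B's double foldl over the literal pad, with the counter expanded, is the fold over pvPairs
theorem pvAlt_expand (L : List Char) :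
    pvPadB.foldl (fun total keys =>
      (PySem.List.enumerate keys.toList 0).foldl
        (fun total p => total + (p.1 + 1) * (PySem.Dict.counter L).getD p.2 0) total) 0
    = pvPairs.foldl (fun t p => t + p.2 * (L.count p.1 : Int)) 0 := by
  simp [pvPadB, pvPairs, PySem.List.enumerate, PySem.Dict.getD_counter, List.foldl]

-- grouping by character: the weighted-count sum over the pad equals the per-character weight sum
theorem pvSumSwap (ps : List (Char × Int)) (L : List Char) :
    (ps.map (fun p => p.2 * (L.count p.1 : Int))).sum
    = (L.map (fun c => pvW ps c)).sum := by
  induction L with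
  | nil => simp
  | cons x L ih =>
      have hsplit : (ps.map (fun p => p.2 * (((x :: L).count p.1 : Nat) : Int)))
          = ps.map (fun p => p.2 * (if p.1 = x then 1 else 0) + p.2 * (L.count p.1 : Int)) := by
        apply List.map_congr_left
        intro p _
        rw [List.count_cons]
        push_cast
        by_cases hx : p.1 = x
        · simp [hx]; ring
        · simp [hx]
          exact Or.inl (fun h => hx h.symm)
      rw [hsplit, List.sum_map_add, ih, List.map_cons, List.sum_cons, pvW]

theorem pvMain (L : List Char) :
    L.foldl (fun s i => s + pvInnerA i pvPadA) 0
    = pvPairs.foldl (fun t p => t + p.2 * (L.count p.1 : Int)) 0 := by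
  rw [PySem.List.foldl_add, PySem.List.foldl_add, pvSumSwap]
  congr 1
  exact congrArg List.sum (List.map_congr_left (fun c _ => pvStep_eq c))

-- ===== VERDICT (by name: the statement is the Claim_ definition above) =====
theorem presses_spec : Claim_equal_presses := by
  intro phrase _
  unfold Spec_presses presses presses_alt
  rw [PySem.Dict.foldl_insert_getD_add_one_eq_counter, pvAlt_expand, pvMain]
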